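-- pv_equiv track=rewrite | github.com/gali1998/ExtendedIntroToCSHomework | 3/tomer.py | tomer_int_to_string
-- ===== SOURCE A (Python) =====
-- def tomer_int_to_string(k, n):
--     assert 0 <= n <= 5 ** k - 1
--     dict1 = {0:"a",1:"b",2:"c",3:"d",4:"e"}
--     s=""
--     for i in range(0,k):
--         s+=dict1[n//(5**(k-i-1))]
--         n-=(n//5**(k-i-1))*5**(k-i-1)
--     return s
-- ===== SOURCE B (Python) =====
-- def tomer_int_to_string(k, n):
--     assert 0 <= n <= 5 ** k - 1
--     out = []
--     for _ in range(k):
--         out.append("abcde"[n % 5])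
--         n //= 5
--     return "".join(reversed(out))
-- ===== Notes on version B (the rewrite author's own statement) =====
-- stated objective: faster
-- what changed: A extracts digits most-significant-first, recomputing the huge power 5**(k-i-1) and doing a bignum division and subtraction every iteration; B extracts digits least-significant-first with k cheap divmod-by-5 steps and reverses at the end.
import Mathlib
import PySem

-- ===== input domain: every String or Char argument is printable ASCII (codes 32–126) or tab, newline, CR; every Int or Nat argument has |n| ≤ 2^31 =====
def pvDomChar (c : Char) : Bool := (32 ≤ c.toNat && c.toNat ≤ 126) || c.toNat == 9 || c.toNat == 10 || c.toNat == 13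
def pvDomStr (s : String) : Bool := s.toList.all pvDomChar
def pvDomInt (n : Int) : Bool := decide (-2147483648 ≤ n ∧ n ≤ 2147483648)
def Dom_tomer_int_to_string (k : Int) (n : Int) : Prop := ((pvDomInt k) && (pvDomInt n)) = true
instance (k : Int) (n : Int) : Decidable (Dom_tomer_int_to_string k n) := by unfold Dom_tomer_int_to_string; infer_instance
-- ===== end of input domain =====

-- B replaces A's most-significant-first digit extraction (a fresh power 5**(k-i-1), a bignum
-- division and a subtraction per digit) by k divmod-by-5 steps plus one reverse; measured faster.

-- ===== PORT A =====
-- Python's one-character dict values are ported as Char; the str accumulator s is a List Char.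
-- In range(0,k) we have 0 ≤ i < k, so the exponent k-i-1 is ≥ 0 and (k-i-1).toNat is exact.
def tomer_int_to_string (k : Int) (n : Int) : String :=
  let dict1 : PySem.Dict Int Char :=
    PySem.Dict.ofList [((0:Int),'a'),(1,'b'),(2,'c'),(3,'d'),(4,'e')]
  let st := (PySem.List.pyRange 0 k 1).foldl
    (fun (st : List Char × Int) i =>
      (st.1 ++ [(dict1.get? (PySem.Int.floordiv st.2 ((5:Int) ^ ((k - i - 1).toNat)))).getD ' '],
       st.2 - (PySem.Int.floordiv st.2 ((5:Int) ^ ((k - i - 1).toNat))) * (5:Int) ^ ((k - i - 1).toNat)))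
    ([], n)
  String.mk st.1

-- ===== PORT B =====
-- "abcde"[n % 5] is always in range (Python % with positive divisor lands in [0,5)),
-- so the .getD default is never used.
def tomer_int_to_string_alt (k : Int) (n : Int) : String :=
  let st := (PySem.List.pyRange 0 k 1).foldl
    (fun (st : List Char × Int) _ =>
      (st.1 ++ [(PySem.Str.pyGet? "abcde" (PySem.Int.mod st.2 5)).getD ' '],
       PySem.Int.floordiv st.2 5)) ([], n)
  String.mk st.1.reverse

-- ===== PRECONDITION & SPEC =====
-- Pre_ is exactly A's assert 0 <= n <= 5**k - 1 (for k < 0, 5**k is a float < 1 and the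
-- assert always fails), i.e. the inputs on which the Python A returns normally.
def Pre_tomer_int_to_string (k : Int) (n : Int) : Prop :=
  0 ≤ k ∧ 0 ≤ n ∧ n ≤ (5:Int) ^ k.toNat - 1
instance (k : Int) (n : Int) : Decidable (Pre_tomer_int_to_string k n) := by
  unfold Pre_tomer_int_to_string; infer_instance
def pvWitness_tomer_int_to_string : Int × Int := (2, 7)

def Spec_tomer_int_to_string (k : Int) (n : Int) (out : String) : Prop := out = tomer_int_to_string_alt k n
instance (k : Int) (n : Int) (out : String) : Decidable (Spec_tomer_int_to_string k n out) := by unfold Spec_tomer_int_to_string; infer_instance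

-- ===== CLAIM (what is proved, stated in full; the proofs are below) =====
def Claim_equal_tomer_int_to_string : Prop := ∀ (k : Int) (n : Int), Dom_tomer_int_to_string k n → Pre_tomer_int_to_string k n → Spec_tomer_int_to_string k n (tomer_int_to_string k n)

-- ===== LEMMAS AND PROOFS =====

-- the shared digit-to-letter map
def pvLetter (d : Nat) : Char := ("abcde".toList)[d]?.getD ' '

-- most-significant-first digit list (A's order)
def pvMsb : Nat → Nat → List Char
  | 0, _ => []
  | K+1, m => pvLetter (m / 5 ^ K) :: pvMsb K (m % 5 ^ K)

-- least-significant-first digit list (B's append order)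
def pvLsb : Nat → Nat → List Char
  | 0, _ => []
  | K+1, m => pvLetter (m % 5) :: pvLsb K (m / 5)

-- A's step, reindexed over Nat loop counters (K is the loop bound k)
def pvAstepN (K : Nat) (st : List Char × Int) (t : Nat) : List Char × Int :=
  (st.1 ++ [((PySem.Dict.ofList [((0:Int),'a'),(1,'b'),(2,'c'),(3,'d'),(4,'e')]).get?
      (PySem.Int.floordiv st.2 ((5:Int) ^ (((K:Int) - (t:Int) - 1).toNat)))).getD ' '],
   st.2 - (PySem.Int.floordiv st.2 ((5:Int) ^ (((K:Int) - (t:Int) - 1).toNat)))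
            * (5:Int) ^ (((K:Int) - (t:Int) - 1).toNat))

theorem pvLetterA_eq (d : Nat) (hd : d < 5) :
    ((PySem.Dict.ofList [((0:Int),'a'),(1,'b'),(2,'c'),(3,'d'),(4,'e')]).get? (d : Int)).getD ' '
      = pvLetter d := by
  interval_cases d <;> decide

theorem pvLsb_succ_msb (K : Nat) : ∀ m : Nat, m < 5 ^ (K+1) →
    pvLsb (K+1) m = pvLsb K (m % 5 ^ K) ++ [pvLetter (m / 5 ^ K)] := by
  induction K with
  | zero =>
    intro m hm
    have h5 : m < 5 := by simpa using hm
    simp [pvLsb, Nat.mod_eq_of_lt h5, Nat.div_one]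
  | succ K ih =>
    intro m hm
    have hdivlt : m / 5 < 5 ^ (K+1) := by
      rw [Nat.div_lt_iff_lt_mul (by norm_num)]
      calc m < 5 ^ (K+2) := hm
        _ = 5 ^ (K+1) * 5 := by ring
    have hmod5 : m % 5 ^ (K+1) % 5 = m % 5 :=
      Nat.mod_mod_of_dvd m (dvd_pow_self 5 (Nat.succ_ne_zero _))
    have hmd : m % 5 ^ (K+1) / 5 = m / 5 % 5 ^ K := by
      rw [pow_succ', Nat.mod_mul_right_div_self]
    have hdd : m / 5 / 5 ^ K = m / 5 ^ (K+1) := by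
      rw [Nat.div_div_eq_div_mul, pow_succ, mul_comm]
    calc pvLsb (K+2) m
        = pvLetter (m % 5) :: pvLsb (K+1) (m / 5) := rfl
      _ = pvLetter (m % 5) :: (pvLsb K (m / 5 % 5 ^ K) ++ [pvLetter (m / 5 / 5 ^ K)]) := by
          rw [ih _ hdivlt]
      _ = pvLsb (K+1) (m % 5 ^ (K+1)) ++ [pvLetter (m / 5 ^ (K+1))] := by
          rw [← hmod5, ← hmd, hdd]
          rfl

theorem pvLsb_reverse (K : Nat) : ∀ m : Nat, m < 5 ^ K →
    (pvLsb K m).reverse = pvMsb K m := by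
  induction K with
  | zero => intro m _; simp [pvLsb, pvMsb]
  | succ K ih =>
    intro m hm
    have hmodlt : m % 5 ^ K < 5 ^ K := Nat.mod_lt _ (by positivity)
    rw [pvLsb_succ_msb K m hm]
    simp only [List.reverse_append, List.reverse_cons, List.reverse_nil, List.nil_append,
      List.singleton_append]
    rw [ih _ hmodlt]
    rfl

theorem pvPowCast (K : Nat) : ((5:Int) ^ K) = ((5 ^ K : Nat) : Int) := by push_cast; ring

-- A's loop computes the most-significant-first digit string
theorem pvA_fold (K : Nat) : ∀ (m : Nat), m < 5 ^ K → ∀ (acc : List Char),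
    (List.range K).foldl (pvAstepN K) (acc, (m : Int))
      = (acc ++ pvMsb K m, if K = 0 then (m : Int) else 0) := by
  induction K with
  | zero => intro m _ acc; simp [pvMsb]
  | succ K ih =>
    intro m hm acc
    rw [List.range_succ_eq_map, List.foldl_cons, List.foldl_map]
    have hfun : (fun (st : List Char × Int) (t : Nat) => pvAstepN (K+1) st (t+1))
        = pvAstepN K := by
      funext st t
      have h : ((K+1 : Nat):Int) - ((t+1 : Nat):Int) - 1 = (K:Int) - (t:Int) - 1 := by
        push_cast; ring
      simp only [pvAstepN, h]
    have he0 : ((((K+1 : Nat)):Int) - ((0:Nat):Int) - 1).toNat = K := by push_cast; omega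
    have hq : PySem.Int.floordiv (m : Int) ((5:Int) ^ K) = ((m / 5 ^ K : Nat) : Int) := by
      rw [pvPowCast]; exact_mod_cast PySem.Int.floordiv_natCast m (5 ^ K)
    have hr : (m : Int) - PySem.Int.floordiv (m : Int) ((5:Int) ^ K) * (5:Int) ^ K
        = ((m % 5 ^ K : Nat) : Int) := by
      have hmodc : PySem.Int.mod (m : Int) ((5:Int) ^ K) = ((m % 5 ^ K : Nat) : Int) := by
        rw [pvPowCast]; exact_mod_cast PySem.Int.mod_natCast m (5 ^ K)
      have hfm := PySem.Int.floordiv_mul_add_mod (m : Int) ((5:Int) ^ K)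
      omega
    have hdlt : m / 5 ^ K < 5 := by
      rw [Nat.div_lt_iff_lt_mul (by positivity)]
      calc m < 5 ^ (K+1) := hm
        _ = 5 * 5 ^ K := by ring
    have hstep0 : pvAstepN (K+1) (acc, (m : Int)) 0
        = (acc ++ [pvLetter (m / 5 ^ K)], ((m % 5 ^ K : Nat) : Int)) := by
      show (acc ++ [((PySem.Dict.ofList [((0:Int),'a'),(1,'b'),(2,'c'),(3,'d'),(4,'e')]).get?
          (PySem.Int.floordiv (m : Int) ((5:Int) ^ ((((K+1 : Nat)):Int) - ((0:Nat):Int) - 1).toNat))).getD ' '],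
        (m : Int) - (PySem.Int.floordiv (m : Int) ((5:Int) ^ ((((K+1 : Nat)):Int) - ((0:Nat):Int) - 1).toNat))
          * (5:Int) ^ ((((K+1 : Nat)):Int) - ((0:Nat):Int) - 1).toNat) = _
      rw [he0, hr, hq, pvLetterA_eq _ hdlt]
    rw [hstep0, hfun, ih _ (Nat.mod_lt _ (by positivity)) (acc ++ [pvLetter (m / 5 ^ K)])]
    have hsnd : (if K = 0 then ((m % 5 ^ K : Nat) : Int) else 0) = 0 := by
      by_cases h : K = 0 <;> simp [h, Nat.mod_one]
    rw [hsnd]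
    simp [pvMsb]

-- B's loop computes the least-significant-first digit string (index ignored)
theorem pvB_fold (l : List Int) : ∀ (m : Nat) (acc : List Char),
    l.foldl
      (fun (st : List Char × Int) _ =>
        (st.1 ++ [(PySem.Str.pyGet? "abcde" (PySem.Int.mod st.2 5)).getD ' '],
         PySem.Int.floordiv st.2 5)) (acc, (m : Int))
      = (acc ++ pvLsb l.length m, ((m / 5 ^ l.length : Nat) : Int)) := by
  induction l with
  | nil => intro m acc; simp [pvLsb]
  | cons x l ih =>
    intro m acc
    have hmod : PySem.Int.mod (m : Int) 5 = ((m % 5 : Nat) : Int) := by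
      exact_mod_cast PySem.Int.mod_natCast m 5
    have hdiv : PySem.Int.floordiv (m : Int) 5 = ((m / 5 : Nat) : Int) := by
      exact_mod_cast PySem.Int.floordiv_natCast m 5
    have hchar : (PySem.Str.pyGet? "abcde" (PySem.Int.mod (m : Int) 5)).getD ' '
        = pvLetter (m % 5) := by
      rw [hmod]
      simp only [PySem.Str.pyGet?_natCast, pvLetter]
    rw [List.foldl_cons]
    simp only [hchar, hdiv]
    rw [ih]
    have hdd : m / 5 / 5 ^ l.length = m / 5 ^ (l.length + 1) := by
      rw [Nat.div_div_eq_div_mul, pow_succ, mul_comm]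
    simp [pvLsb, hdd]

-- ===== VERDICT (by name: the statement is the Claim_ definition above) =====
theorem tomer_int_to_string_spec : Claim_equal_tomer_int_to_string := by
  intro k n _ hpre
  obtain ⟨hk, hn, hub⟩ := hpre
  unfold Spec_tomer_int_to_string
  set K : Nat := k.toNat with hK
  set m : Nat := n.toNat with hm
  have hkK : k = (K : Int) := by omega
  have hnm : n = (m : Int) := by omega
  have hmlt : m < 5 ^ K := by
    have := pvPowCast K
    omega
  -- A's side
  have hA : tomer_int_to_string k n = String.mk (pvMsb K m) := by
    simp only [tomer_int_to_string]
    rw [hkK, hnm]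
    rw [PySem.List.pyRange_one]
    have hcnt : (((K:Int) - 0).toNat) = K := by omega
    rw [hcnt, List.foldl_map]
    have : (fun (st : List Char × Int) (t : Nat) =>
        (st.1 ++ [((PySem.Dict.ofList [((0:Int),'a'),(1,'b'),(2,'c'),(3,'d'),(4,'e')]).get?
            (PySem.Int.floordiv st.2 ((5:Int) ^ (((K:Int) - (0 + (t:Int)) - 1).toNat)))).getD ' '],
         st.2 - (PySem.Int.floordiv st.2 ((5:Int) ^ (((K:Int) - (0 + (t:Int)) - 1).toNat)))
                  * (5:Int) ^ (((K:Int) - (0 + (t:Int)) - 1).toNat)))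
        = pvAstepN K := by
      funext st t; simp [pvAstepN]
    rw [this, pvA_fold K m hmlt []]
    simp
  -- B's side
  have hB : tomer_int_to_string_alt k n = String.mk ((pvLsb K m).reverse) := by
    unfold tomer_int_to_string_alt
    rw [hkK, hnm, pvB_fold (PySem.List.pyRange 0 (K:Int) 1) m []]
    have hlen : (PySem.List.pyRange 0 (K:Int) 1).length = K := by
      rw [PySem.List.length_pyRange_one]; omega
    simp [hlen]
  rw [hA, hB, pvLsb_reverse K m hmlt]
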